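-- pv_equiv track=rewrite | github.com/JavaLamer/Graph_vizualization | for_bd.py | simplify_ip
-- ===== SOURCE A (Python) =====
-- from itertools import zip_longest
--
-- def simplify_ip(ip_list):
--     if len(ip_list) > 1:
--         return "many"
--
--     split_ips = [ip.split('.') for ip in map(str, ip_list)]
--     transposed = list(zip_longest(*split_ips, fillvalue=None))
--     simplified_ip = [
--         next(filter(None, segment), '*') if len(set(filter(None, segment))) == 1 else '*'
--         for segment in transposed[:4]
--     ]
--     return '.'.join(simplified_ip)
-- ===== SOURCE B (Python) =====
-- def simplify_ip(ip_list):
--     if len(ip_list) > 1: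
--         return "many"
--     if not ip_list:
--         return ""
--     parts = str(ip_list[0]).split('.')[:4]
--     return '.'.join(p if p else '*' for p in parts)
-- ===== Notes on version B (the rewrite author's own statement) =====
-- stated objective: simpler
-- what changed: B replaces the zip_longest transpose and per-column set-consensus with direct handling of the at-most-one IP: an empty-list guard returning '', then split the single IP, take 4 parts and map empty parts to '*'.
import Mathlib
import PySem

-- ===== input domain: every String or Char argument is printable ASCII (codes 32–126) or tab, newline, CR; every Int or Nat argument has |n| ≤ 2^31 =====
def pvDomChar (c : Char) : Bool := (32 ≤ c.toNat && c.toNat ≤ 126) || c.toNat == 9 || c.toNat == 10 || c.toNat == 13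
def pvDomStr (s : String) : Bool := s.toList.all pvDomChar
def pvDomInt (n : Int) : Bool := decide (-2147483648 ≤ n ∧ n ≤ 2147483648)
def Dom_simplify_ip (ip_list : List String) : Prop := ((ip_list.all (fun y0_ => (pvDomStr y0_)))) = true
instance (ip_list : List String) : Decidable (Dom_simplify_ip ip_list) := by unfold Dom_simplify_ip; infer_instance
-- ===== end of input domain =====

-- B drops A's zip_longest transpose and per-column set-consensus, handling the at-most-one IP directly (objective: simpler).

-- ip.split('.') — sep "." is non-empty, so PySem.Str.split? always returns some (exact)
def pvSplitDot (ip : String) : List String := (PySem.Str.split? ip ".").getD []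

-- ===== PORT A =====
-- itertools.zip_longest(*xss, fillvalue=None): columns up to the longest row, missing entries = None (exact)
def pvZipLongest (xss : List (List String)) : List (List (Option String)) :=
  (List.range ((xss.map (·.length)).foldr max 0)).map (fun i => xss.map (fun xs => xs[i]?))

-- filter(None, segment): keep truthy elements (non-None, non-empty string), as the strings they are
def pvTruthy (segment : List (Option String)) : List String :=
  segment.filterMap (fun o => match o with
    | none => none
    | some s => if s = "" then none else some s)

def simplify_ip (ip_list : List String) : String :=
  if ip_list.length > 1 then "many"
  else
    let split_ips := ip_list.map (fun ip => pvSplitDot ip)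
    let transposed := pvZipLongest split_ips
    let simplified_ip := (transposed.take 4).map (fun segment =>
      if PySem.Set.len (PySem.Set.ofList (pvTruthy segment)) = 1
      then (pvTruthy segment).headD "*"
      else "*")
    PySem.Str.join "." simplified_ip

-- ===== PORT B =====
def simplify_ip_alt (ip_list : List String) : String :=
  if ip_list.length > 1 then "many"
  else match ip_list with
    | [] => ""
    | ip :: _ =>
      let parts := (pvSplitDot ip).take 4
      PySem.Str.join "." (parts.map (fun p => if p = "" then "*" else p))

-- ===== PRECONDITION & SPEC =====
def Spec_simplify_ip (ip_list : List String) (out : String) : Prop := out = simplify_ip_alt ip_list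
instance (ip_list : List String) (out : String) : Decidable (Spec_simplify_ip ip_list out) := by unfold Spec_simplify_ip; infer_instance

-- ===== CLAIM (what is proved, stated in full; the proofs are below) =====
def Claim_equal_simplify_ip : Prop := ∀ (ip_list : List String), Dom_simplify_ip ip_list → Spec_simplify_ip ip_list (simplify_ip ip_list)

-- ===== LEMMAS AND PROOFS =====

-- the transpose of a single row is the row of singleton columns
theorem pvZipLongest_single (ps : List String) :
    pvZipLongest [ps] = ps.map (fun p => [some p]) := by
  unfold pvZipLongest
  simp only [List.map_cons, List.map_nil, List.foldr_cons, List.foldr_nil]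
  apply List.ext_getElem
  · simp
  · intro i h1 h2
    simp at h1
    simp [List.getElem?_eq_getElem (by omega : i < ps.length)]

theorem segment_single (p : String) :
    (if PySem.Set.len (PySem.Set.ofList (pvTruthy [some p])) = 1
     then (pvTruthy [some p]).headD "*" else "*") = (if p = "" then "*" else p) := by
  by_cases h : p = "" <;>
    simp [pvTruthy, h, PySem.Set.ofList, PySem.Set.add, PySem.Set.len, PySem.Set.empty]

-- ===== VERDICT (by name: the statement is the Claim_ definition above) =====
theorem simplify_ip_spec : Claim_equal_simplify_ip := by
  intro ip_list _
  unfold Spec_simplify_ip simplify_ip simplify_ip_alt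
  by_cases hlen : ip_list.length > 1
  · simp [hlen]
  · simp only [hlen, if_false]
    match ip_list with
    | [] =>
      simp only [List.map_nil]
      decide
    | [ip] =>
      simp only [List.map_cons, List.map_nil, pvZipLongest_single]
      rw [← List.map_take, List.map_map]
      congr 1
      apply List.map_congr_left
      intro p _
      exact segment_single p
    | a :: b :: rest => simp at hlen
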